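-- pv_equiv track=rewrite | github.com/collinsakenga/codewars_solutions | 6 kyu/Missing Alphabet.py | insert_missing_letters
-- ===== SOURCE A (Python) =====
-- def insert_missing_letters(st):
--     alphabet=list("abcdefghijklmnopqrstuvwxyz")
--     for i in set(st):
--         alphabet.remove(i)
--     if not alphabet:
--         return st
--     res=""
--     for index,i in enumerate(st):
--         if i in st[:index]:
--             res+=i
--             continue
--         letter=i.lower()
--         flag=True
--         while ord(letter)<=ord("z"):
--             if letter in alphabet:
--                 res+=(i if i.islower() else i.upper())+"".join(j.upper() if i.islower() else j for j in alphabet[alphabet.index(letter):])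
--                 flag=False
--                 break
--             letter=chr(ord(letter)+1)
--         if flag:
--             res+=i
--     return res
-- ===== SOURCE B (Python) =====
-- def insert_missing_letters(st):
--     present = set(st)
--     # suffix[c] = the missing letters >= c, upper-cased, built in one reverse pass
--     suffix = {}
--     acc = ""
--     for c in reversed("abcdefghijklmnopqrstuvwxyz"):
--         if c not in present:
--             acc = c.upper() + acc
--         suffix[c] = acc
--     seen = set()
--     parts = []
--     for ch in st:
--         parts.append(ch)
--         if ch not in seen:
--             seen.add(ch)
--             parts.append(suffix.get(ch, ""))
--     return "".join(parts)
-- ===== Notes on version B (the rewrite author's own statement) =====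
-- stated objective: faster
-- what changed: Replaces A's per-first-occurrence prefix scan (i in st[:index]) and linear alphabet search (the while loop plus list.index) by a precomputed suffix table of missing letters built in one reverse pass over the alphabet, plus a single forward pass over st with a seen-set.
import Mathlib
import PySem

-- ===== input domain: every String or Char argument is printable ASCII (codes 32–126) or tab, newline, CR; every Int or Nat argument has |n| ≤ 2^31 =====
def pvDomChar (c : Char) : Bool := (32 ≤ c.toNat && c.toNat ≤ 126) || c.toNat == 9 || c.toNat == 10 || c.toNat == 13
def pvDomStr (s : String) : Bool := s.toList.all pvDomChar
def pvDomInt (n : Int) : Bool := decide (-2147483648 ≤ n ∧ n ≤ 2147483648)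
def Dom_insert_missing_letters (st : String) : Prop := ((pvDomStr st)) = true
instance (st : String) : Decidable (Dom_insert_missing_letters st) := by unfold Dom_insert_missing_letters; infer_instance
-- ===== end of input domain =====

-- B replaces A's per-character prefix scan and linear alphabet search by a precomputed
-- suffix table (one reverse pass over the alphabet) plus a single forward pass with a seen-set.


-- ===== PORT A =====
/-- A's inner `while` loop: scan letter codes from `n` up to `ord 'z'`; at the first code whose
character is in `alphabet` return the chunk Python appends (`some …` = the `break` branch),
`none` when the loop falls through with `flag` still true. -/
def imlWhile (alphabet : List Char) (i : Char) (n : Nat) : Option (List Char) :=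
  if n ≤ 122 then
    if Char.ofNat n ∈ alphabet then
      some ((if PySem.Chars.islower i then i else PySem.Chars.upperChar i) ::
        (alphabet.drop ((PySem.List.index? alphabet (Char.ofNat n)).getD 0)).map
          (fun j => if PySem.Chars.islower i then PySem.Chars.upperChar j else j))
    else imlWhile alphabet i (n + 1)
  else none
termination_by 123 - n

def insert_missing_letters (st : String) : String :=
  let s := st.toList
  let alphabet : List Char := "abcdefghijklmnopqrstuvwxyz".toList
  -- for i in set(st): alphabet.remove(i)   (remove? = none is Python's ValueError, outside Pre_)
  let alphabet := (PySem.Set.ofList s).foldl (fun a c => (PySem.List.remove? a c).getD a) alphabet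
  if alphabet = [] then st
  else
    String.ofList <| (PySem.List.enumerate s).foldl (fun res p =>
      if PySem.Chars.isIn [p.2] (PySem.List.slice s none (some p.1)) then res ++ [p.2]
      else
        match imlWhile alphabet p.2 (PySem.Chars.lowerChar p.2).toNat with
        | some chunk => res ++ chunk
        | none => res ++ [p.2]) []

-- ===== PORT B =====
def insert_missing_letters_alt (st : String) : String :=
  let s := st.toList
  let present := PySem.Set.ofList s
  let suffix := (("abcdefghijklmnopqrstuvwxyz".toList).reverse.foldl
      (fun (p : PySem.Dict Char (List Char) × List Char) c =>
        let acc := if PySem.Set.contains present c then p.2 else PySem.Chars.upperChar c :: p.2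
        (p.1.insert c acc, acc))
      (PySem.Dict.empty, [])).1
  String.ofList <| (s.foldl (fun (q : PySem.Set Char × List Char) ch =>
      if PySem.Set.contains q.1 ch then (q.1, q.2 ++ [ch])
      else (PySem.Set.add q.1 ch, q.2 ++ [ch] ++ suffix.getD ch []))
      (PySem.Set.empty, [])).2

-- ===== PRECONDITION & SPEC =====
-- Pre_ admits exactly the inputs A returns on: every character of st is a lowercase letter;
-- on any other character `alphabet.remove` raises ValueError.
def Pre_insert_missing_letters (st : String) : Prop :=
  st.toList.all (fun c => 'a' ≤ c && c ≤ 'z') = true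
instance (st : String) : Decidable (Pre_insert_missing_letters st) := by
  unfold Pre_insert_missing_letters; infer_instance

def pvWitness_insert_missing_letters : String := "holly"

def Spec_insert_missing_letters (st : String) (out : String) : Prop :=
  out = insert_missing_letters_alt st
instance (st : String) (out : String) : Decidable (Spec_insert_missing_letters st out) := by
  unfold Spec_insert_missing_letters; infer_instance

-- ===== CLAIM (what is proved, stated in full; the proofs are below) =====
def Claim_equal_insert_missing_letters : Prop := ∀ (st : String),
  Dom_insert_missing_letters st → Pre_insert_missing_letters st →
  Spec_insert_missing_letters st (insert_missing_letters st)

-- ===== LEMMAS AND PROOFS =====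
-- A's `alphabet.remove(i)` on a duplicate-free list is one filter step.
theorem removeOne_eq (a : List Char) (c : Char) (ha : a.Nodup) :
    (PySem.List.remove? a c).getD a = a.filter (fun x => !(x == c)) := by
  by_cases hc : c ∈ a
  · rw [PySem.List.remove?_eq_some_erase a c hc, Option.getD_some, List.Nodup.erase_eq_filter ha]
    apply List.filter_congr; intro x _
    simp [bne]
  · rw [(PySem.List.remove?_eq_none_iff a c).mpr hc, Option.getD_none]
    symm; apply List.filter_eq_self.mpr
    intro x hx
    simp only [Bool.not_eq_eq_eq_not, Bool.not_true, beq_eq_false_iff_ne, ne_eq]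
    rintro rfl; exact hc hx

-- A's whole `for i in set(st): alphabet.remove(i)` loop is a filter.
theorem removeFold_eq (cs : List Char) : ∀ (a : List Char), a.Nodup →
    cs.foldl (fun a c => (PySem.List.remove? a c).getD a) a
      = a.filter (fun x => !(cs.contains x)) := by
  induction cs with
  | nil => intro a _; simp
  | cons c cs ih =>
    intro a ha
    rw [List.foldl_cons, removeOne_eq a c ha, ih _ (List.Nodup.filter _ ha),
      List.filter_filter]
    apply List.filter_congr
    intro x _
    by_cases h1 : x = c <;> by_cases h2 : x ∈ cs <;> simp [h1, h2]


theorem char_eq_of_toNat {c d : Char} (h : c.toNat = d.toNat) : c = d := by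
  apply Char.ext; exact UInt32.toNat_inj.mp h
theorem toNat_ofNat_le {n : Nat} (h : n ≤ 122) : (Char.ofNat n).toNat = n := by
  have hv : n.isValidChar := Or.inl (by omega)
  simp [Char.ofNat, hv, Char.toNat, Char.ofNatAux]

theorem imlWhile_eq (m : List Char) (hm : m.Pairwise (· < ·)) (hz : ∀ j ∈ m, j.toNat ≤ 122)
    (i : Char) (n : Nat) : imlWhile m i n =
    if (m.filter (fun j => n ≤ j.toNat)) = [] then none
    else some ((if PySem.Chars.islower i then i else PySem.Chars.upperChar i) ::
      (m.filter (fun j => n ≤ j.toNat)).map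
        (fun j => if PySem.Chars.islower i then PySem.Chars.upperChar j else j)) := by
  fun_induction imlWhile m i n with
  | case1 n hn hc => ?_
  | case2 n hn hc ih => ?_
  | case3 n hn => ?_
  · -- found: Char.ofNat n ∈ m
    set c := Char.ofNat n with hcdef
    have hcn : c.toNat = n := toNat_ofNat_le hn
    obtain ⟨k, hk⟩ := Option.isSome_iff_exists.mp ((PySem.List.index?_isSome_iff m c).mpr hc)
    obtain ⟨pre, suf, hmeq, hlen, hpre⟩ := (PySem.List.index?_eq_some_iff m c k).mp hk
    have hdrop : m.drop k = c :: suf := by rw [hmeq, ← hlen, List.drop_left]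
    have hfil : m.filter (fun j => n ≤ j.toNat) = c :: suf := by
      rw [hmeq, List.filter_append]
      have hpair := hm
      rw [hmeq, List.pairwise_append] at hpair
      obtain ⟨hp1, hp2, hp3⟩ := hpair
      have h1 : pre.filter (fun j => n ≤ j.toNat) = [] := by
        apply List.filter_eq_nil_iff.mpr
        intro x hx
        have hlt : x.toNat < c.toNat := hp3 x hx c (by simp)
        simp only [decide_eq_true_eq, not_le]
        omega
      have h2 : (c :: suf).filter (fun j => n ≤ j.toNat) = c :: suf := by
        apply List.filter_eq_self.mpr
        intro x hx
        rcases List.mem_cons.mp hx with rfl | hx2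
        · simp [hcn]
        · have hlt : c.toNat < x.toNat := (List.pairwise_cons.mp hp2).1 x hx2
          simp only [decide_eq_true_eq]
          omega
      rw [h1, h2, List.nil_append]
    rw [hk, hfil, Option.getD_some, ← hlen] at *
    rw [hdrop]
    simp
  · -- not found, recurse
    rw [ih]
    have hfe : m.filter (fun j => n ≤ j.toNat) = m.filter (fun j => n + 1 ≤ j.toNat) := by
      apply List.filter_congr
      intro j hj
      have : j.toNat ≠ n := by
        intro he
        exact hc (char_eq_of_toNat (he.trans (toNat_ofNat_le hn).symm) ▸ hj)
      apply decide_eq_decide.mpr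
      omega
    rw [hfe]
  · -- n > 122
    have : m.filter (fun j => n ≤ j.toNat) = [] := by
      apply List.filter_eq_nil_iff.mpr
      intro x hx
      have := hz x hx
      simp only [decide_eq_true_eq, not_le]
      omega
    simp [this]

def imlBase : List Char := "abcdefghijklmnopqrstuvwxyz".toList

def imlEmit (miss : List Char) (ch : Char) : List Char :=
  (miss.filter (fun j => ch ≤ j)).map PySem.Chars.upperChar

def bStep (present : PySem.Set Char) (p : PySem.Dict Char (List Char) × List Char) (c : Char) :
    PySem.Dict Char (List Char) × List Char :=
  let acc := if PySem.Set.contains present c then p.2 else PySem.Chars.upperChar c :: p.2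
  (p.1.insert c acc, acc)

theorem bFold_getD_not_mem (present : PySem.Set Char) (l : List Char) (c : Char) (hc : c ∉ l) :
    ∀ (d : PySem.Dict Char (List Char)) (acc : List Char),
    ((l.foldl (bStep present) (d, acc)).1).getD c [] = d.getD c [] := by
  induction l with
  | nil => intro d acc; rfl
  | cons c1 rest ih =>
    intro d acc
    rw [List.foldl_cons]
    rw [ih (by intro h; exact hc (List.mem_cons_of_mem _ h))]
    exact PySem.Dict.getD_insert_of_ne _ _ _ (by rintro rfl; exact hc (List.mem_cons_self))

theorem bFold_getD_mem (present : PySem.Set Char) :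
    ∀ (l : List Char), l.Pairwise (· > ·) → ∀ c ∈ l,
    ∀ (d : PySem.Dict Char (List Char)) (acc : List Char),
    ((l.foldl (bStep present) (d, acc)).1).getD c [] =
      ((l.filter (fun j => c ≤ j && !(PySem.Set.contains present j))).reverse.map
        PySem.Chars.upperChar) ++ acc := by
  intro l
  induction l with
  | nil => intro _ c hc; exact absurd hc (by simp)
  | cons c1 rest ih =>
    intro hp c hc d acc
    have hrest : ∀ x ∈ rest, x < c1 := fun x hx => (List.pairwise_cons.mp hp).1 x hx
    rw [List.foldl_cons]
    rcases List.mem_cons.mp hc with rfl | hcr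
    · -- c = c1 : not in rest, value is the acc inserted now
      have hnr : c ∉ rest := fun h => absurd (hrest c h) (lt_irrefl c)
      have hmemeq : ∀ b : Bool, PySem.Set.contains present c = b → (c ∈ present) = (b = true) := by
        intro b hb; rw [← hb]; simp
      rw [bFold_getD_not_mem present rest c hnr]
      show (PySem.Dict.insert _ c _).getD c [] = _
      rw [PySem.Dict.getD_insert_self]
      have hfr : rest.filter (fun j => c ≤ j && !(PySem.Set.contains present j)) = [] := by
        apply List.filter_eq_nil_iff.mpr
        intro x hx
        simp only [Bool.and_eq_true, decide_eq_true_eq, not_and]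
        intro hle
        exact absurd hle (not_le_of_gt (hrest x hx))
      rw [List.filter_cons, hfr]
      by_cases hmem : c ∈ present <;> simp [hmem]
    · -- c in rest
      have hlt : c < c1 := hrest c hcr
      rw [ih (List.Pairwise.of_cons hp) c hcr]
      rw [List.filter_cons]
      by_cases hmem : c1 ∈ present <;> simp [bStep, hmem, le_of_lt hlt]

theorem mem_base_iff (c : Char) : c ∈ imlBase ↔ (97 ≤ c.toNat ∧ c.toNat ≤ 122) := by
  constructor
  · intro h
    have hm : c.toNat ∈ imlBase.map Char.toNat := List.mem_map_of_mem h
    have hb : imlBase.map Char.toNat =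
      [97,98,99,100,101,102,103,104,105,106,107,108,109,110,111,112,113,114,115,116,117,118,
       119,120,121,122] := by decide
    rw [hb] at hm
    simp at hm; omega
  · rintro ⟨h1, h2⟩
    have hc : c = Char.ofNat c.toNat := (char_eq_of_toNat (toNat_ofNat_le h2)).symm
    rw [hc]
    interval_cases h : c.toNat <;> decide

theorem contains_ofList_eq (s : List Char) (j : Char) :
    PySem.Set.contains (PySem.Set.ofList s) j = s.contains j := by
  by_cases hj : j ∈ s <;>
    simp [PySem.Set.contains_eq_listContains, PySem.Set.mem_ofList, hj]

theorem suffix_getD (s : List Char) (c : Char) (h1 : 97 ≤ c.toNat) (h2 : c.toNat ≤ 122) :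
    ((imlBase.reverse.foldl (bStep (PySem.Set.ofList s)) (PySem.Dict.empty, [])).1).getD c [] =
      imlEmit (imlBase.filter (fun x => !(s.contains x))) c := by
  have hcmem : c ∈ imlBase.reverse := List.mem_reverse.mpr ((mem_base_iff c).mpr ⟨h1, h2⟩)
  have hpair : imlBase.reverse.Pairwise (· > ·) := by decide
  rw [bFold_getD_mem _ _ hpair c hcmem, List.append_nil]
  rw [List.filter_reverse, List.reverse_reverse, imlEmit, List.filter_filter]
  congr 1
  apply List.filter_congr
  intro j _
  rw [contains_ofList_eq]

def imlSpine (miss : List Char) : List Char → PySem.Set Char → List Char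
  | [], _ => []
  | ch :: rest, seen =>
    (if PySem.Set.contains seen ch then [ch] else ch :: imlEmit miss ch) ++
      imlSpine miss rest (PySem.Set.add seen ch)

theorem imlSpine_nil_miss (rest : List Char) (seen : PySem.Set Char) :
    imlSpine [] rest seen = rest := by
  induction rest generalizing seen with
  | nil => rfl
  | cons ch rest ih =>
    rw [imlSpine]
    by_cases h : PySem.Set.contains seen ch = true <;> simp [imlEmit, ih]

theorem bLoop_eq (suffix : PySem.Dict Char (List Char)) (miss : List Char) :
    ∀ (rest : List Char) (seen : PySem.Set Char) (parts : List Char),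
    (∀ ch ∈ rest, suffix.getD ch [] = imlEmit miss ch) →
    (rest.foldl (fun (q : PySem.Set Char × List Char) ch =>
        if PySem.Set.contains q.1 ch then (q.1, q.2 ++ [ch])
        else (PySem.Set.add q.1 ch, q.2 ++ [ch] ++ suffix.getD ch []))
      (seen, parts)).2 = parts ++ imlSpine miss rest seen := by
  intro rest
  induction rest with
  | nil => intro seen parts _; simp [imlSpine]
  | cons ch rest ih =>
    intro seen parts hsuf
    rw [List.foldl_cons, imlSpine]
    dsimp only
    by_cases h : ch ∈ seen
    · have hc : PySem.Set.contains seen ch = true := by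
        simp [PySem.Set.contains_eq_listContains, h]
      rw [if_pos hc, ih _ _ (fun c hc2 => hsuf c (List.mem_cons_of_mem _ hc2)),
        PySem.Set.add_of_mem h]
      simp [h]
    · have hc : PySem.Set.contains seen ch = false := by
        simp [PySem.Set.contains_eq_listContains, h]
      rw [if_neg (by simp [h]), ih _ _ (fun c hc2 => hsuf c (List.mem_cons_of_mem _ hc2)),
        hsuf ch List.mem_cons_self]
      simp [h]

theorem islower_of_lc {c : Char} (h1 : 97 ≤ c.toNat) (h2 : c.toNat ≤ 122) :
    PySem.Chars.islower c = true := by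
  have ha : 'a' ≤ c := show (97:Nat) ≤ c.toNat from h1
  have hz : c ≤ 'z' := show c.toNat ≤ (122:Nat) from h2
  simp [PySem.Chars.islower, ha, hz]

theorem lowerChar_of_lc {c : Char} (h1 : 97 ≤ c.toNat) : PySem.Chars.lowerChar c = c := by
  have hnu : PySem.Chars.isupper c = false := by
    have : ¬ (c ≤ 'Z') := by
      intro h
      have : c.toNat ≤ 90 := h
      omega
    simp [PySem.Chars.isupper, this]
  simp [PySem.Chars.lowerChar, hnu]

theorem aLoop_eq (full miss : List Char) (hm : miss.Pairwise (· < ·))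
    (hz : ∀ j ∈ miss, j.toNat ≤ 122) :
    ∀ (rest t res : List Char), full = t ++ rest →
    (∀ c ∈ rest, 97 ≤ c.toNat ∧ c.toNat ≤ 122) →
    ((PySem.List.enumerate rest (t.length : Int)).foldl (fun res p =>
        if PySem.Chars.isIn [p.2] (PySem.List.slice full none (some p.1)) then res ++ [p.2]
        else
          match imlWhile miss p.2 (PySem.Chars.lowerChar p.2).toNat with
          | some chunk => res ++ chunk
          | none => res ++ [p.2]) res)
      = res ++ imlSpine miss rest (PySem.Set.ofList t) := by
  intro rest
  induction rest with
  | nil => intro t res _ _; simp [PySem.List.enumerate_nil, imlSpine]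
  | cons ch rest ih =>
    intro t res hfull hlc
    rw [PySem.List.enumerate_cons, List.foldl_cons, imlSpine]
    dsimp only
    have hslice : PySem.List.slice full none (some (t.length : Int)) = t := by
      rw [PySem.List.slice_to_natCast, hfull, List.take_left]
    rw [hslice]
    have hmemiff : PySem.Chars.isIn [ch] t = true ↔ ch ∈ t := by
      rw [PySem.Chars.isIn_iff_infix, List.singleton_infix_iff]
    have hcont : PySem.Set.contains (PySem.Set.ofList t) ch = (decide (ch ∈ t)) := by
      by_cases hmem : ch ∈ t <;>
        simp [PySem.Set.contains_eq_listContains, PySem.Set.mem_ofList, hmem]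
    have hstep : ∀ r' : List Char,
        (PySem.List.enumerate rest ((t.length : Int) + 1)).foldl (fun res p =>
          if PySem.Chars.isIn [p.2] (PySem.List.slice full none (some p.1)) then res ++ [p.2]
          else
            match imlWhile miss p.2 (PySem.Chars.lowerChar p.2).toNat with
            | some chunk => res ++ chunk
            | none => res ++ [p.2]) r'
        = r' ++ imlSpine miss rest (PySem.Set.add (PySem.Set.ofList t) ch) := by
      intro r'
      have h1 : ((t.length : Int) + 1) = (((t ++ [ch]).length : Nat) : Int) := by
        simp
      have h2 : PySem.Set.add (PySem.Set.ofList t) ch = PySem.Set.ofList (t ++ [ch]) :=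
        (PySem.Set.ofList_append_singleton t ch).symm
      rw [h1, h2]
      exact ih (t ++ [ch]) r' (by rw [hfull, List.append_assoc]; rfl)
        (fun c hc => hlc c (List.mem_cons_of_mem _ hc))
    obtain ⟨hc1, hc2⟩ := hlc ch List.mem_cons_self
    by_cases hmem : ch ∈ t
    · rw [if_pos (hmemiff.mpr hmem), hstep, hcont, if_pos (by simp [hmem])]
      simp
    · rw [if_neg (by rw [hmemiff]; exact hmem), hcont, if_neg (by simp [hmem])]
      rw [lowerChar_of_lc hc1, imlWhile_eq miss hm hz ch ch.toNat]
      have hfe : miss.filter (fun j => ch.toNat ≤ j.toNat) = miss.filter (fun j => ch ≤ j) := by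
        apply List.filter_congr
        intro j _
        exact decide_eq_decide.mpr Iff.rfl
      rw [hfe, islower_of_lc hc1 hc2]
      by_cases hE : miss.filter (fun j => ch ≤ j) = []
      · rw [hE, if_pos rfl]
        dsimp only
        rw [hstep]
        have : imlEmit miss ch = [] := by rw [imlEmit, hE]; rfl
        simp [this]
      · rw [if_neg hE]
        dsimp only
        rw [hstep]
        have : imlEmit miss ch =
            (miss.filter (fun j => ch ≤ j)).map PySem.Chars.upperChar := rfl
        simp [this]

theorem main_eq (st : String) (hpre : Pre_insert_missing_letters st) :
    insert_missing_letters st = insert_missing_letters_alt st := by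
  have hlc : ∀ c ∈ st.toList, 97 ≤ c.toNat ∧ c.toNat ≤ 122 := by
    intro c hc
    have hb := List.all_eq_true.mp hpre c hc
    rw [Bool.and_eq_true, decide_eq_true_eq, decide_eq_true_eq] at hb
    exact ⟨hb.1, hb.2⟩
  have hsuf : ∀ ch ∈ st.toList,
      ((imlBase.reverse.foldl (bStep (PySem.Set.ofList st.toList))
        (PySem.Dict.empty, [])).1).getD ch []
        = imlEmit (imlBase.filter (fun x => !(st.toList.contains x))) ch := by
    intro ch hch
    exact suffix_getD st.toList ch (hlc ch hch).1 (hlc ch hch).2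
  have hB : insert_missing_letters_alt st = String.ofList
      ([] ++ imlSpine (imlBase.filter (fun x => !(st.toList.contains x)))
        st.toList PySem.Set.empty) :=
    congrArg String.ofList
      (bLoop_eq ((imlBase.reverse.foldl (bStep (PySem.Set.ofList st.toList))
          (PySem.Dict.empty, [])).1)
        (imlBase.filter (fun x => !(st.toList.contains x)))
        st.toList PySem.Set.empty [] hsuf)
  rw [hB]
  unfold insert_missing_letters
  dsimp only
  rw [show ("abcdefghijklmnopqrstuvwxyz".toList) = imlBase from rfl]
  have halpha : (PySem.Set.ofList st.toList).foldl
      (fun a c => (PySem.List.remove? a c).getD a) imlBase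
      = imlBase.filter (fun x => !(st.toList.contains x)) := by
    rw [removeFold_eq _ imlBase (by decide)]
    apply List.filter_congr
    intro x _
    have h := contains_ofList_eq st.toList x
    simp only [PySem.Set.contains_eq_listContains] at h
    rw [h]
  rw [halpha]
  by_cases hmiss : imlBase.filter (fun x => !(st.toList.contains x)) = []
  · rw [if_pos hmiss, hmiss, imlSpine_nil_miss]
    simp
  · rw [if_neg hmiss]
    have hmp : (imlBase.filter (fun x => !(st.toList.contains x))).Pairwise (· < ·) :=
      List.Pairwise.filter _ (by decide : imlBase.Pairwise (· < ·))
    have hmz : ∀ j ∈ imlBase.filter (fun x => !(st.toList.contains x)), j.toNat ≤ 122 :=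
      fun j hj => ((mem_base_iff j).mp (List.mem_of_mem_filter hj)).2
    rw [show PySem.List.enumerate st.toList
        = PySem.List.enumerate st.toList ((([] : List Char).length : Nat) : Int) from by
      norm_num]
    rw [aLoop_eq st.toList _ hmp hmz st.toList [] [] (List.nil_append _).symm hlc]
    rfl

-- ===== VERDICT (by name: the statement is the Claim_ definition above) =====
theorem insert_missing_letters_spec : Claim_equal_insert_missing_letters := by
  intro st _ hpre
  unfold Spec_insert_missing_letters
  exact main_eq st hpre
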